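-- pv_equiv track=rewrite | github.com/ugurerol/Oracle_RPD_XML | main.py | make_prs_mdsid_and_columns_list
-- ===== SOURCE A (Python) =====
-- from collections import defaultdict
--
-- def make_prs_mdsid_and_columns_list(joined_prs_list, columns_to_number=None):
--     """
--     joined_prs_list'ten prs_logicaltable_xml bazında uniq liste oluşturur.
--     Aynı logicaltable için tüm eşleşen değerleri numaralandırarak birleştirir.
--
--     columns_to_number: Numara verilecek kolonlar listesi (örn. ['prs_mdsid', 'prs_name', 'prs_columns'])
--     """
--     if columns_to_number is None:
--         columns_to_number = ['prs_xml_name','prs_mdsid','prs_name','prs_alias','prs_hasdispname','prs_hasdispdescription','prs_columns','prs_presentationcatalog_mdsid','prs_presentationcatalog_name','prs_presentationcatalog_hasdispname','prs_presentationcatalog_hasdispdescription','prs_presentationcatalog_isexportkeys','prs_presentationcatalog_isautoaggr','prs_businessmodel_name']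
--
--     grouped = defaultdict(list)
--     for item in joined_prs_list:
--         xml = item.get("prs_logicaltable_xml")
--         if xml:
--             grouped[xml].append(item)
--
--     uniq_list = []
--     for xml, items in grouped.items():
--         new_item = {"prs_logicaltable_xml": xml}
--         for col in columns_to_number:
--             numbered_values = "; ".join(f"{i+1}. '{item.get(col,'')}'" for i, item in enumerate(items))
--             new_item[col] = numbered_values
--         uniq_list.append(new_item)
--
--     return uniq_list
-- ===== SOURCE B (Python) =====
-- def make_prs_mdsid_and_columns_list(joined_prs_list, columns_to_number=None):
--     """One pass: accumulate per-xml counters and per-column joined strings directly,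
--     instead of grouping the items first and formatting each group afterwards."""
--     if columns_to_number is None:
--         columns_to_number = ['prs_xml_name','prs_mdsid','prs_name','prs_alias','prs_hasdispname','prs_hasdispdescription','prs_columns','prs_presentationcatalog_mdsid','prs_presentationcatalog_name','prs_presentationcatalog_hasdispname','prs_presentationcatalog_hasdispdescription','prs_presentationcatalog_isexportkeys','prs_presentationcatalog_isautoaggr','prs_businessmodel_name']
--
--     cols = list(dict.fromkeys(columns_to_number))
--     acc = {}  # xml -> (count, {col: "; "-joined numbered pieces so far})
--     for item in joined_prs_list:
--         xml = item.get("prs_logicaltable_xml")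
--         if not xml:
--             continue
--         n, pieces = acc.get(xml, (0, {}))
--         n += 1
--         for col in cols:
--             piece = f"{n}. '{item.get(col, '')}'"
--             pieces[col] = pieces[col] + "; " + piece if col in pieces else piece
--         acc[xml] = (n, pieces)
--
--     result = []
--     for xml, (n, pieces) in acc.items():
--         row = {"prs_logicaltable_xml": xml}
--         row.update(pieces)
--         result.append(row)
--     return result
-- ===== Notes on version B (the rewrite author's own statement) =====
-- stated objective: alternative
-- what changed: B replaces A's two-phase group-then-format (defaultdict of item lists, then per-group per-column enumerate+join) with a single pass that maintains, per xml, a running counter and already-joined per-column strings, so no item lists are ever stored and no join pass runs at the end.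
import Mathlib
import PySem

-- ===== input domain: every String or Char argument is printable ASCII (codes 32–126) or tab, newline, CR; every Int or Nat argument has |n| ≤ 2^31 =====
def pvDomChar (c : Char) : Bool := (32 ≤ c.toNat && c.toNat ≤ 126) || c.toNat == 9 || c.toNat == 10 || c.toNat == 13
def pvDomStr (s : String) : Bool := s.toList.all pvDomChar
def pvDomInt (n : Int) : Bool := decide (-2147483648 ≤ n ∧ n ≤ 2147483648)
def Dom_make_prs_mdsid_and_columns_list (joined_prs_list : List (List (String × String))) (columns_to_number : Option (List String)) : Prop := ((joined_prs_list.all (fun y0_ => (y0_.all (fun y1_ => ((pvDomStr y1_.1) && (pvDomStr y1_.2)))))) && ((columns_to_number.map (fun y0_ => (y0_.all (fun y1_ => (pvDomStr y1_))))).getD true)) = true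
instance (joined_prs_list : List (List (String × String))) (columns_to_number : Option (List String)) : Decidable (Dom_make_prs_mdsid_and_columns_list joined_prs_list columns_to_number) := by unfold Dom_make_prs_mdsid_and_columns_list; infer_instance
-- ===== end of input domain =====

-- B replaces A's group-then-format two-phase algorithm by a single accumulating pass
-- (per-xml running counter and already-joined per-column strings); same return value.

-- ===== PORT A =====
-- item.get(k) / item.get(k, d): first-match lookup in the association list (exact for Python dict)
def pvGet? (item : List (String × String)) (k : String) : Option String :=
  (item.find? (fun p => p.1 == k)).map (·.2)

def pvGetD (item : List (String × String)) (k d : String) : String :=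
  (pvGet? item k).getD d

def pvDefaultCols : List String :=
  ["prs_xml_name","prs_mdsid","prs_name","prs_alias","prs_hasdispname","prs_hasdispdescription","prs_columns","prs_presentationcatalog_mdsid","prs_presentationcatalog_name","prs_presentationcatalog_hasdispname","prs_presentationcatalog_hasdispdescription","prs_presentationcatalog_isexportkeys","prs_presentationcatalog_isautoaggr","prs_businessmodel_name"]

-- "; ".join(f"{i+1}. '{item.get(col,'')}'" for i, item in enumerate(items))
def pvNum (its : List (List (String × String))) (col : String) : String :=
  PySem.Str.join "; " ((PySem.List.enumerate its).map
    (fun q => PySem.Int.toStr (q.1 + 1) ++ ". '" ++ pvGetD q.2 col "" ++ "'"))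

-- loop body of A's grouping pass (defaultdict(list) append)
def pvStepA (d : PySem.Dict String (List (List (String × String))))
    (item : List (String × String)) : PySem.Dict String (List (List (String × String))) :=
  match pvGet? item "prs_logicaltable_xml" with
  | some xml => if xml ≠ "" then d.modify xml [] (· ++ [item]) else d
  | none => d

def make_prs_mdsid_and_columns_list (joined_prs_list : List (List (String × String))) (columns_to_number : Option (List String)) : List (List (String × String)) :=
  let cols := columns_to_number.getD pvDefaultCols
  let grouped := joined_prs_list.foldl pvStepA PySem.Dict.empty
  grouped.items.map (fun p =>
    (cols.foldl (fun nd col => nd.insert col (pvNum p.2 col))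
      (PySem.Dict.ofList [("prs_logicaltable_xml", p.1)])).items)

-- ===== PORT B =====
-- f"{n}. '{item.get(col, '')}'"
def pvPiece (n : Int) (item : List (String × String)) (col : String) : String :=
  PySem.Int.toStr n ++ ". '" ++ pvGetD item col "" ++ "'"

-- pieces[col] + "; " + piece if col in pieces else piece
def pvExtend (o : Option String) (piece : String) : String :=
  match o with
  | some s => s ++ "; " ++ piece
  | none => piece

-- loop body of B's single pass: bump the counter, extend each per-column joined string
def pvStepB (colsU : List String)
    (acc : PySem.Dict String (Int × PySem.Dict String String))
    (item : List (String × String)) : PySem.Dict String (Int × PySem.Dict String String) :=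
  match pvGet? item "prs_logicaltable_xml" with
  | some xml =>
    if xml ≠ "" then
      let e := acc.getD xml (0, PySem.Dict.empty)
      let n := e.1 + 1
      let pieces := colsU.foldl (fun pm col =>
        pm.insert col (pvExtend (pm.get? col) (pvPiece n item col))) e.2
      acc.insert xml (n, pieces)
    else acc
  | none => acc

def make_prs_mdsid_and_columns_list_alt (joined_prs_list : List (List (String × String))) (columns_to_number : Option (List String)) : List (List (String × String)) :=
  let cols := columns_to_number.getD pvDefaultCols
  let colsU : List String := PySem.Set.ofList cols   -- list(dict.fromkeys(cols))
  let acc := joined_prs_list.foldl (pvStepB colsU) PySem.Dict.empty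
  acc.items.map (fun p =>
    ((PySem.Dict.ofList [("prs_logicaltable_xml", p.1)]).update p.2.2.items).items)

-- ===== PRECONDITION & SPEC =====
def Spec_make_prs_mdsid_and_columns_list (joined_prs_list : List (List (String × String))) (columns_to_number : Option (List String)) (out : List (List (String × String))) : Prop := out = make_prs_mdsid_and_columns_list_alt joined_prs_list columns_to_number
instance (joined_prs_list : List (List (String × String))) (columns_to_number : Option (List String)) (out : List (List (String × String))) : Decidable (Spec_make_prs_mdsid_and_columns_list joined_prs_list columns_to_number out) := by unfold Spec_make_prs_mdsid_and_columns_list; infer_instance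

-- ===== CLAIM (what is proved, stated in full; the proofs are below) =====
def Claim_equal_make_prs_mdsid_and_columns_list : Prop := ∀ (joined_prs_list : List (List (String × String))) (columns_to_number : Option (List String)), Dom_make_prs_mdsid_and_columns_list joined_prs_list columns_to_number → Spec_make_prs_mdsid_and_columns_list joined_prs_list columns_to_number (make_prs_mdsid_and_columns_list joined_prs_list columns_to_number)

-- ===== LEMMAS AND PROOFS =====

-- the abstraction function: a group's item list ↦ B's accumulator entry for it
def pvFF (colsU : List String) (its : List (List (String × String))) :
    Int × PySem.Dict String String :=
  ((its.length : Int), PySem.Dict.mk (colsU.map (fun c => (c, pvNum its c))))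

-- the invariant tying A's grouping dict to B's accumulator
def pvInv (colsU : List String)
    (g : PySem.Dict String (List (List (String × String))))
    (a : PySem.Dict String (Int × PySem.Dict String String)) : Prop :=
  a = PySem.Dict.mk (g.items.map (fun p => (p.1, pvFF colsU p.2))) ∧
  g.keys.Nodup ∧ ∀ p ∈ g.items, p.2 ≠ []

-- get? after a fold of inserts whose values depend only on the key
theorem pv_get?_foldl_insert_const {ν : Type} (w : String → ν) (l : List String)
    (d : PySem.Dict String ν) (c : String) :
    (l.foldl (fun d k => d.insert k (w k)) d).get? c
      = if c ∈ l then some (w c) else d.get? c := by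
  induction l generalizing d with
  | nil => simp
  | cons k t ih =>
    simp only [List.foldl_cons, ih, PySem.Dict.get?_insert, List.mem_cons]
    by_cases hct : c ∈ t <;> by_cases hck : c = k <;> simp [hct, hck]

-- inserting a key with the value it already has is the identity (unique keys)
theorem pv_insert_self {ν : Type} (d : PySem.Dict String ν) (hnd : d.keys.Nodup)
    (c : String) (v : ν) (h : d.get? c = some v) : d.insert c v = d := by
  have hc : d.contains c = true := by
    rw [PySem.Dict.contains_eq_isSome_get?, h]; rfl
  have hmem : (c, v) ∈ d.items := PySem.Dict.mem_items_of_get?_eq_some _ h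
  apply PySem.Dict.ext
  rw [PySem.Dict.items_insert_of_contains (h := hc)]
  conv_rhs => rw [← List.map_id d.items]
  apply List.map_congr_left
  intro p hp
  by_cases hpc : p.1 = c
  · have : p = (c, v) := by
      apply List.inj_on_of_nodup_map (f := Prod.fst) hnd hp hmem
      simpa using hpc
    simp [this]
  · simp [hpc]

-- a fold of key-determined inserts may be deduplicated
theorem pv_foldl_insert_dedup {ν : Type} (w : String → ν) (cols : List String)
    (d : PySem.Dict String ν) (hnd : d.keys.Nodup) :
    cols.foldl (fun d k => d.insert k (w k)) d
      = (PySem.Set.ofList cols).foldl (fun d k => d.insert k (w k)) d := by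
  induction cols using List.reverseRecOn with
  | nil => simp [PySem.Set.ofList_nil]
  | append_singleton cols c ih =>
    rw [PySem.Set.ofList_append_singleton, List.foldl_append]
    by_cases hc : c ∈ cols
    · rw [PySem.Set.add_of_mem (by simpa [PySem.Set.mem_ofList] using hc)]
      simp only [List.foldl_cons, List.foldl_nil]
      rw [← ih]
      exact pv_insert_self _ (PySem.Dict.nodup_keys_foldl_insert _ _ _ hnd) _ _
        (by rw [pv_get?_foldl_insert_const]; simp [hc])
    · rw [PySem.Set.add_of_not_mem (by simpa [PySem.Set.mem_ofList] using hc)]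
      rw [List.foldl_append, ih]

-- get? after B's inner fold (distinct keys; the inserted value may read the dict)
theorem pv_get?_foldl_insert_fn {ν : Type} (v : Option ν → String → ν)
    (ks : List String) (hk : ks.Nodup) (pm : PySem.Dict String ν) (c : String) :
    (ks.foldl (fun pm k => pm.insert k (v (pm.get? k) k)) pm).get? c
      = if c ∈ ks then some (v (pm.get? c) c) else pm.get? c := by
  induction ks generalizing pm with
  | nil => simp
  | cons k t ih =>
    have hk' : k ∉ t := (List.nodup_cons.mp hk).1
    have ht : t.Nodup := (List.nodup_cons.mp hk).2
    simp only [List.foldl_cons, ih ht, List.mem_cons]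
    by_cases hck : c = k
    · subst hck
      simp [hk', PySem.Dict.get?_insert_self]
    · rw [PySem.Dict.get?_insert_of_ne (hne := hck)]
      by_cases hct : c ∈ t <;> simp [hct, hck]

-- items after B's inner fold when all keys are fresh
theorem pv_items_foldl_insert_fn {ν : Type} (v : Option ν → String → ν)
    (ks : List String) (hk : ks.Nodup) (pm : PySem.Dict String ν)
    (hfresh : ∀ k ∈ ks, pm.contains k = false) :
    (ks.foldl (fun pm k => pm.insert k (v (pm.get? k) k)) pm).items
      = pm.items ++ ks.map (fun k => (k, v none k)) := by
  induction ks generalizing pm with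
  | nil => simp
  | cons k t ih =>
    have hkf : pm.contains k = false := hfresh k (by simp)
    have hget : pm.get? k = none := by
      rw [PySem.Dict.get?_eq_none_iff_contains]; exact hkf
    simp only [List.foldl_cons, hget]
    rw [ih (List.nodup_cons.mp hk).2]
    · rw [PySem.Dict.items_insert_of_not_contains (h := hkf)]
      simp
    · intro k' hk'
      rw [PySem.Dict.contains_insert]
      have : k' ≠ k := fun h => (List.nodup_cons.mp hk).1 (h ▸ hk')
      simp [this, hfresh k' (by simp [hk'])]

theorem pv_set_update_of_subset (s : PySem.Set String) (xs : List String)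
    (h : ∀ x ∈ xs, x ∈ s) : PySem.Set.update s xs = s := by
  induction xs generalizing s with
  | nil => simp [PySem.Set.update_nil]
  | cons x t ih =>
    rw [PySem.Set.update_cons, PySem.Set.add_of_mem (h x (by simp))]
    exact ih s (fun y hy => h y (by simp [hy]))

theorem pv_chars_join_snoc (sep l : List Char) (ls : List (List Char)) :
    PySem.Chars.join sep (ls ++ [l])
      = if ls = [] then l else PySem.Chars.join sep ls ++ sep ++ l := by
  induction ls with
  | nil => simp [PySem.Chars.join_singleton]
  | cons a t ih =>
    cases t with
    | nil => simp [PySem.Chars.join_cons_cons, PySem.Chars.join_singleton]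
    | cons b r =>
      have h1 : PySem.Chars.join sep ((a :: b :: r) ++ [l])
          = a ++ sep ++ PySem.Chars.join sep ((b :: r) ++ [l]) := by
        simpa using PySem.Chars.join_cons_cons sep a b (r ++ [l])
      rw [h1, ih]
      simp [PySem.Chars.join_cons_cons, List.append_assoc]

theorem pv_str_join_snoc (sep : String) (ps : List String) (p : String) :
    PySem.Str.join sep (ps ++ [p])
      = if ps = [] then p else PySem.Str.join sep ps ++ sep ++ p := by
  unfold PySem.Str.join
  rw [List.map_append, List.map_singleton, pv_chars_join_snoc]
  by_cases h : ps = []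
  · simp [h]
  · have : ps.map String.toList ≠ [] := by simpa using h
    rw [if_neg this, if_neg h]
    simp only [String.ofList_append, String.ofList_toList]

-- numbering a group extended by one more item
theorem pvNum_snoc (its : List (List (String × String))) (it : List (String × String))
    (c : String) :
    pvNum (its ++ [it]) c
      = if its = [] then pvPiece 1 it c
        else pvNum its c ++ "; " ++ pvPiece ((its.length : Int) + 1) it c := by
  unfold pvNum pvPiece
  rw [PySem.List.enumerate_append]
  simp only [PySem.List.enumerate_cons, PySem.List.enumerate_nil, List.map_append,
    List.map_cons, List.map_nil, pv_str_join_snoc]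
  by_cases h : its = []
  · simp [h]
  · have hm : (PySem.List.enumerate its 0).map
        (fun q => PySem.Int.toStr (q.1 + 1) ++ ". '" ++ pvGetD q.2 c "" ++ "'") ≠ [] := by
      obtain ⟨x, t, rfl⟩ : ∃ x t, its = x :: t := by
        cases its with
        | nil => exact absurd rfl h
        | cons x t => exact ⟨x, t, rfl⟩
      simp [PySem.List.enumerate_cons]
    rw [if_neg hm, if_neg h]
    norm_num

-- get? through the key-preserving item map relating B's accumulator to A's dict
theorem pv_get?_mk_map {α β : Type} (F : α → β) (l : List (String × α)) (c : String) :
    (PySem.Dict.mk (l.map (fun p => (p.1, F p.2)))).get? c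
      = ((PySem.Dict.mk l).get? c).map F := by
  simp only [PySem.Dict.get?, List.find?_map]
  have : ((fun p : String × β => p.1 == c) ∘ fun p : String × α => (p.1, F p.2))
      = fun p : String × α => p.1 == c := rfl
  rw [this, Option.map_map, Option.map_map]
  rfl

theorem pvInv_step (colsU : List String) (hcu : colsU.Nodup)
    (g : PySem.Dict String (List (List (String × String))))
    (a : PySem.Dict String (Int × PySem.Dict String String))
    (item : List (String × String)) (h : pvInv colsU g a) :
    pvInv colsU (pvStepA g item) (pvStepB colsU a item) := by
  obtain ⟨ha, hnd, hne⟩ := h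
  unfold pvStepA pvStepB
  cases hx : pvGet? item "prs_logicaltable_xml" with
  | none => exact ⟨ha, hnd, hne⟩
  | some xml =>
    by_cases hxe : xml ≠ ""
    · simp only [if_pos hxe]
      have hmk : PySem.Dict.mk g.items = g := rfl
      have hget : a.get? xml = (g.get? xml).map (fun its => pvFF colsU its) := by
        rw [ha, pv_get?_mk_map, hmk]
      cases hg : g.get? xml with
      | none =>
        have gcont : g.contains xml = false := by
          rw [PySem.Dict.contains_eq_isSome_get?, hg]; rfl
        have acont : a.contains xml = false := by
          rw [PySem.Dict.contains_eq_isSome_get?, hget, hg]; rfl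
        have hgetD : a.getD xml (0, PySem.Dict.empty) = (0, PySem.Dict.empty) := by
          rw [PySem.Dict.getD_eq_get?_getD, hget, hg]; rfl
        have hgD : g.getD xml [] = [] := by
          rw [PySem.Dict.getD_eq_get?_getD, hg]; rfl
        simp only [PySem.Dict.modify, hgD, hgetD, List.nil_append]
        have hpieces :
            colsU.foldl (fun pm col =>
              pm.insert col (pvExtend (pm.get? col) (pvPiece (1:Int) item col)))
              PySem.Dict.empty
            = PySem.Dict.mk (colsU.map (fun c => (c, pvNum [item] c))) := by
          apply PySem.Dict.ext
          rw [pv_items_foldl_insert_fn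
            (v := fun o col => pvExtend o (pvPiece (1:Int) item col)) colsU hcu _ (by simp)]
          simp only [PySem.Dict.empty, List.nil_append]
          apply List.map_congr_left
          intro k _
          have := pvNum_snoc [] item k
          simp only [List.nil_append] at this
          simp [this, pvExtend]
        refine ⟨?_, ?_, ?_⟩
        · apply PySem.Dict.ext
          rw [PySem.Dict.items_insert_of_not_contains (h := acont),
            PySem.Dict.items_insert_of_not_contains (h := gcont)]
          simp only [List.map_append, List.map_cons, List.map_nil]
          rw [ha]
          congr 1
          simp [pvFF, hpieces]
        · exact PySem.Dict.nodup_keys_insert _ _ _ hnd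
        · intro p hp
          rw [PySem.Dict.mem_items_insert] at hp
          rcases hp with hp | hp
          · simp [hp]
          · exact hne p hp.1
      | some its0 =>
        have hits0 : its0 ≠ [] :=
          hne _ (PySem.Dict.mem_items_of_get?_eq_some _ hg)
        have gcont : g.contains xml = true := by
          rw [PySem.Dict.contains_eq_isSome_get?, hg]; rfl
        have acont : a.contains xml = true := by
          rw [PySem.Dict.contains_eq_isSome_get?, hget, hg]; rfl
        have hgetD : a.getD xml (0, PySem.Dict.empty) = pvFF colsU its0 := by
          rw [PySem.Dict.getD_eq_get?_getD, hget, hg]; rfl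
        have hgD : g.getD xml [] = its0 := by
          rw [PySem.Dict.getD_eq_get?_getD, hg]; rfl
        simp only [PySem.Dict.modify, hgD, hgetD]
        set pm0 : PySem.Dict String String :=
          PySem.Dict.mk (colsU.map (fun c => (c, pvNum its0 c))) with hpm0
        have hkeys0 : pm0.keys = colsU := by
          simp [hpm0, PySem.Dict.keys, Function.comp_def]
        have hnd0 : pm0.keys.Nodup := by rw [hkeys0]; exact hcu
        set n : Int := (pvFF colsU its0).1 + 1 with hn
        have hn' : n = (its0.length : Int) + 1 := by simp [hn, pvFF]
        set step := fun (pm : PySem.Dict String String) col =>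
          pm.insert col (pvExtend (pm.get? col) (pvPiece n item col)) with hstep
        have hpieces : colsU.foldl step (pvFF colsU its0).2
            = PySem.Dict.mk (colsU.map (fun c => (c, pvNum (its0 ++ [item]) c))) := by
          have hpre : (pvFF colsU its0).2 = pm0 := rfl
          rw [hpre]
          have hndp : (colsU.foldl step pm0).keys.Nodup :=
            PySem.Dict.nodup_keys_foldl_insert _ _ _ hnd0
          have hkeysp : (colsU.foldl step pm0).keys = colsU := by
            rw [hstep, PySem.Dict.keys_foldl_insert, hkeys0,
              pv_set_update_of_subset _ _ (fun x hx => hx)]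
          have hgetp : ∀ k ∈ colsU,
              (colsU.foldl step pm0).get? k = some (pvNum (its0 ++ [item]) k) := by
            intro k hkmem
            have h0 : pm0.get? k = some (pvNum its0 k) := by
              apply PySem.Dict.get?_of_mem_items _ _ hnd0
              simp only [hpm0, List.mem_map]
              exact ⟨k, hkmem, rfl⟩
            rw [hstep]
            rw [pv_get?_foldl_insert_fn
              (v := fun o col => pvExtend o (pvPiece n item col)) colsU hcu pm0 k]
            rw [if_pos hkmem, h0]
            have := pvNum_snoc its0 item k
            rw [if_neg hits0] at this
            simp [this, hn', pvExtend]
          apply PySem.Dict.ext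
          rw [PySem.Dict.items_eq_map_keys _ hndp "", hkeysp]
          apply List.map_congr_left
          intro k hkmem
          rw [PySem.Dict.getD_eq_get?_getD, hgetp k hkmem]
          rfl
        refine ⟨?_, ?_, ?_⟩
        · apply PySem.Dict.ext
          rw [PySem.Dict.items_insert_of_contains (h := acont),
            PySem.Dict.items_insert_of_contains (h := gcont)]
          rw [ha]
          simp only [List.map_map]
          apply List.map_congr_left
          intro p hp
          by_cases hpx : p.1 = xml
          · simp only [Function.comp_apply, hpx, beq_self_eq_true, if_pos]
            have h2 : pvFF colsU (its0 ++ [item])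
                = (n, List.foldl step (pvFF colsU its0).2 colsU) := by
              rw [hpieces]
              unfold pvFF
              refine Prod.ext ?_ rfl
              simp [hn']
            rw [h2]
          · have : (p.1 == xml) = false := by simp [hpx]
            simp [Function.comp, this]
        · exact PySem.Dict.nodup_keys_insert _ _ _ hnd
        · intro p hp
          rw [PySem.Dict.mem_items_insert] at hp
          rcases hp with hp | hp
          · simp [hp]
          · exact hne p hp.1
    · simp only [if_neg hxe]
      exact ⟨ha, hnd, hne⟩

theorem pvInv_foldl (colsU : List String) (hcu : colsU.Nodup)
    (l : List (List (String × String)))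
    (g : PySem.Dict String (List (List (String × String))))
    (a : PySem.Dict String (Int × PySem.Dict String String))
    (h : pvInv colsU g a) :
    pvInv colsU (l.foldl pvStepA g) (l.foldl (pvStepB colsU) a) := by
  induction l generalizing g a with
  | nil => exact h
  | cons it t ih =>
    exact ih _ _ (pvInv_step colsU hcu g a it h)

-- ===== VERDICT (by name: the statement is the Claim_ definition above) =====
theorem make_prs_mdsid_and_columns_list_spec : Claim_equal_make_prs_mdsid_and_columns_list := by
  intro jl ctn _hdom
  unfold Spec_make_prs_mdsid_and_columns_list
  unfold make_prs_mdsid_and_columns_list make_prs_mdsid_and_columns_list_alt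
  dsimp only
  set cols := ctn.getD pvDefaultCols with hcols
  set colsU : List String := PySem.Set.ofList cols with hcolsU
  have hcu : colsU.Nodup := PySem.Set.nodup_ofList cols
  have hinv := pvInv_foldl colsU hcu jl PySem.Dict.empty PySem.Dict.empty
    ⟨rfl, by simp [PySem.Dict.keys_empty], by simp [PySem.Dict.empty]⟩
  obtain ⟨ha, hnd, -⟩ := hinv
  rw [ha]
  simp only [List.map_map]
  apply List.map_congr_left
  intro p _
  simp only [Function.comp_apply, pvFF, PySem.Dict.update, List.foldl_map]
  congr 1
  rw [pv_foldl_insert_dedup (w := fun c => pvNum p.2 c) cols _ (by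
    simp [PySem.Dict.ofList, PySem.Dict.update, PySem.Dict.keys, PySem.Dict.insert,
      PySem.Dict.empty, PySem.Dict.contains]), hcolsU]
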